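-- pv_equiv track=rewrite | github.com/erdemahsen/ceng111 | ch3s16.py | desc_length
-- ===== SOURCE A (Python) =====
-- def desc_length(liste):
--     leng=len(liste)
--     n=0
--     toplamUzunluk=0
--     while n<len(liste):
--         uzunluk=len(str(liste[n]))
--         toplamUzunluk+= uzunluk
--         n=n+1
--     return toplamUzunluk
-- ===== SOURCE B (Python) =====
-- def desc_length(liste):
--     total = 0
--     for x in liste:
--         if x < 0:
--             total += 1
--             x = -x
--         d = 1
--         while x >= 10:
--             x //= 10
--             d += 1
--         total += d
--     return total
-- ===== Notes on version B (the rewrite author's own statement) =====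
-- stated objective: alternative
-- what changed: B never builds any string: it computes each element's printed length arithmetically (one for a minus sign plus a digit count obtained by repeated floor division by 10), whereas A materialises str(x) for every element and measures it.
import Mathlib
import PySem

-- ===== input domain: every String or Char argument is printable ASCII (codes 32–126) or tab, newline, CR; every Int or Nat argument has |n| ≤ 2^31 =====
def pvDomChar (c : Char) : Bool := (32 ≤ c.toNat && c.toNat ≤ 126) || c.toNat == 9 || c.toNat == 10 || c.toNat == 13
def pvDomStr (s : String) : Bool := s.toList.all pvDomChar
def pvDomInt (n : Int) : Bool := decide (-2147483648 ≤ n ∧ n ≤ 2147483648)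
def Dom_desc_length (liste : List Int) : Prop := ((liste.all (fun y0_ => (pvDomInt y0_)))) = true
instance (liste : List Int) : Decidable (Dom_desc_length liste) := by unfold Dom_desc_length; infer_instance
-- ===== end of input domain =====

-- B computes each element's printed length arithmetically (sign + repeated floor division by 10)
-- and never builds a string, where A measures len(str(x)) per element (alternative; same cost).

-- ===== PORT A =====
-- while n < len(liste): uzunluk = len(str(liste[n])); toplamUzunluk += uzunluk; n += 1
def desc_length (liste : List Int) : Int :=
  (PySem.List.pyRange 0 (liste.length : Int) 1).foldl
    (fun toplamUzunluk n =>
      toplamUzunluk + PySem.Str.len (PySem.Int.toStr (PySem.List.pyGetD liste n 0))) 0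

-- ===== PORT B =====
-- inner 'd = 1; while x >= 10: x //= 10; d += 1'; x is nonnegative here, so Python's
-- floor division '//' coincides with Nat division (exact on this domain).
def pvDigitCount (m : Nat) : Nat :=
  if m < 10 then 1 else pvDigitCount (m / 10) + 1
decreasing_by exact Nat.div_lt_self (by omega) (by omega)

-- for x in liste: if x < 0: total += 1; x = -x; … ; total += d
def desc_length_alt (liste : List Int) : Int :=
  liste.foldl
    (fun total x =>
      (if x < 0 then total + 1 else total) +
        (pvDigitCount (if x < 0 then (-x).natAbs else x.natAbs) : Int)) 0

-- ===== PRECONDITION & SPEC =====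
def Spec_desc_length (liste : List Int) (out : Int) : Prop := out = desc_length_alt liste
instance (liste : List Int) (out : Int) : Decidable (Spec_desc_length liste out) := by unfold Spec_desc_length; infer_instance

-- ===== CLAIM (what is proved, stated in full; the proofs are below) =====
def Claim_equal_desc_length : Prop := ∀ (liste : List Int), Dom_desc_length liste → Spec_desc_length liste (desc_length liste)

-- ===== LEMMAS AND PROOFS =====

-- length of toDigitsCore with sufficient fuel = digit count plus the accumulator's length
theorem toDigitsCore_len_eq : ∀ (f n : Nat) (ds : List Char), n < 10 ^ (f + 1) →
    (Nat.toDigitsCore 10 (f + 1) n ds).length = pvDigitCount n + ds.length := by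
  intro f
  induction f with
  | zero =>
    intro n ds h
    have hn : n / 10 = 0 := Nat.div_eq_of_lt (by omega)
    simp [Nat.toDigitsCore, hn, pvDigitCount, Nat.lt_of_div_eq_zero (by omega) hn]
    omega
  | succ f ih =>
    intro n ds h
    by_cases h10 : n < 10
    · have hn : n / 10 = 0 := Nat.div_eq_of_lt h10
      simp [Nat.toDigitsCore, hn, pvDigitCount, h10]
      omega
    · have hn : n / 10 ≠ 0 := by
        intro h0; exact h10 (Nat.lt_of_div_eq_zero (by omega) h0)
      have hlt : n / 10 < 10 ^ (f + 1) := by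
        rw [Nat.div_lt_iff_lt_mul (show 0 < 10 by omega)]
        calc n < 10 ^ (f + 1 + 1) := h
          _ = 10 ^ (f + 1) * 10 := by ring
      have hrec := ih (n / 10) ((n % 10).digitChar :: ds) hlt
      have hpd : pvDigitCount n = pvDigitCount (n / 10) + 1 := by
        rw [pvDigitCount]; simp [h10]
      simp [Nat.toDigitsCore, hn] at hrec ⊢
      rw [hrec, hpd]
      omega

theorem toDigits_len_eq (n : Nat) : (Nat.toDigits 10 n).length = pvDigitCount n := by
  have hfuel : n < 10 ^ (n + 1) := by
    calc n < 2 ^ n := Nat.lt_two_pow_self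
      _ ≤ 10 ^ n := Nat.pow_le_pow_left (by omega) n
      _ ≤ 10 ^ (n + 1) := Nat.pow_le_pow_right (by omega) (by omega)
  have := toDigitsCore_len_eq n n [] hfuel
  simpa [Nat.toDigits] using this

-- per element: len(str(x)) = sign mark + arithmetic digit count
theorem len_toStr_eq (x : Int) :
    PySem.Str.len (PySem.Int.toStr x) =
      (if x < 0 then (1 : Int) else 0) + (pvDigitCount (if x < 0 then (-x).natAbs else x.natAbs) : Int) := by
  have hl : (PySem.Int.toStr x).toList = PySem.Int.toChars x := PySem.Int.toList_toStr x
  simp only [PySem.Str.len, hl, PySem.Int.toChars]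
  by_cases hx : x < 0
  · simp [hx, toDigits_len_eq, Int.natAbs_neg]; omega
  · have : x.toNat = x.natAbs := by omega
    simp [hx, this, toDigits_len_eq]

-- the two folds agree for every starting accumulator
theorem folds_eq : ∀ (l : List Int) (acc : Int),
    l.foldl (fun t x => t + PySem.Str.len (PySem.Int.toStr x)) acc =
      l.foldl (fun total x =>
        (if x < 0 then total + 1 else total) +
          (pvDigitCount (if x < 0 then (-x).natAbs else x.natAbs) : Int)) acc := by
  intro l
  induction l with
  | nil => intro acc; rfl
  | cons x l ih =>
    intro acc
    simp only [List.foldl_cons]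
    rw [ih]
    congr 1
    rw [len_toStr_eq x]
    by_cases hx : x < 0
    · simp [hx]; ring
    · simp [hx]

-- ===== VERDICT (by name: the statement is the Claim_ definition above) =====
theorem desc_length_spec : Claim_equal_desc_length := by
  intro liste _
  unfold Spec_desc_length desc_length desc_length_alt
  rw [PySem.List.foldl_pyRange_zero_pyGetD' liste 0
        (fun toplamUzunluk x => toplamUzunluk + PySem.Str.len (PySem.Int.toStr x)) 0]
  exact folds_eq liste 0
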